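-- pv_equiv track=rewrite | github.com/EwelinaStasiak/rouglike | hen_talk.py | dialog_window
-- ===== SOURCE A (Python) =====
-- def dialog_window(talking_window, text):
--     row = 2
--     col = 3
--
--     for el in text:
--         if el == "\n":
--             row += 1
--             col = 3
--         elif el == "\t":
--             col += 4
--         else:
--             talking_window[row][col] = el
--             col += 1
--
--     return talking_window
-- ===== SOURCE B (Python) =====
-- def dialog_window(talking_window, text):
--     row = 2
--     for line in text.split("\n"):
--         col = 3
--         for el in line:
--             if el == "\t":
--                 col += 4
--             else:
--                 talking_window[row][col] = el
--                 col += 1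
--         row += 1
--     return talking_window
-- ===== Notes on version B (the rewrite author's own statement) =====
-- stated objective: alternative
-- what changed: Replaces A's single flat character pass that threads a (row, col) cursor across newlines with split-on-'\n' into lines and a nested loop: outer loop over lines resetting col = 3, inner loop writing characters of each line.
import Mathlib
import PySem

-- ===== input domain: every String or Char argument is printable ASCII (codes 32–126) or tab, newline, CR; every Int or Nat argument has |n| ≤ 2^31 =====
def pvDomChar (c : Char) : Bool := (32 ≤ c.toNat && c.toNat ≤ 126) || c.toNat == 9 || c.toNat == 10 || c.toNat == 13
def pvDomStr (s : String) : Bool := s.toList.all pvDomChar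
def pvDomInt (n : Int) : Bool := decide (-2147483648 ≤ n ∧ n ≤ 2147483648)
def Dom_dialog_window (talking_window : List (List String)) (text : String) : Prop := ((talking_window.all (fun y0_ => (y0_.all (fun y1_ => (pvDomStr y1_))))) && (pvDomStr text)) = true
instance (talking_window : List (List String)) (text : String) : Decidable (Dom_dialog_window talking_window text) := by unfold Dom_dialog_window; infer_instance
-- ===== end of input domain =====

-- B replaces A's single flat cursor-threading pass with split-on-newline plus a nested
-- per-line pass (objective: alternative decomposition, same cost). Both A and B mutate
-- talking_window in place in Python and return the same object; the equivalence proved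
-- here is about the returned grid value.

-- ===== PORT A =====
-- talking_window[row][col] = el, hand-ported as a functional double List.set; exact
-- whenever row < len(grid) and col < len(grid[row]), which Pre_dialog_window guarantees
-- (Python raises IndexError otherwise; such inputs are excluded by Pre_dialog_window).
def pvSetCell (g : List (List String)) (r c : Nat) (s : String) : List (List String) :=
  g.set r ((g.getD r []).set c s)

def pvStepA (st : List (List String) × Nat × Nat) (el : Char) : List (List String) × Nat × Nat :=
  if el = '\n' then (st.1, st.2.1 + 1, 3)
  else if el = '\t' then (st.1, st.2.1, st.2.2 + 4)
  else (pvSetCell st.1 st.2.1 st.2.2 (String.ofList [el]), st.2.1, st.2.2 + 1)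

def dialog_window (talking_window : List (List String)) (text : String) : List (List String) :=
  (text.toList.foldl pvStepA (talking_window, 2, 3)).1

-- ===== PORT B =====
-- hand port of text.split("\n") (exact: Python's str.split with a one-char separator;
-- "" splits to [""], every '\n' starts a new piece)
def pvSplitNL : List Char → List (List Char)
  | [] => [[]]
  | c :: cs =>
    if c = '\n' then [] :: pvSplitNL cs
    else
      match pvSplitNL cs with
      | [] => [[c]]          -- unreachable: pvSplitNL never returns []
      | l :: ls => (c :: l) :: ls

def pvStepB (row : Nat) (st : List (List String) × Nat) (el : Char) : List (List String) × Nat :=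
  if el = '\t' then (st.1, st.2 + 4)
  else (pvSetCell st.1 row st.2 (String.ofList [el]), st.2 + 1)

def pvLines (g : List (List String)) (row : Nat) : List (List Char) → List (List String)
  | [] => g
  | l :: ls => pvLines (l.foldl (pvStepB row) (g, 3)).1 (row + 1) ls

def dialog_window_alt (talking_window : List (List String)) (text : String) : List (List String) :=
  pvLines talking_window 2 (pvSplitNL text.toList)

-- ===== PRECONDITION & SPEC =====
-- the current line's prefix: the characters after the last newline of l
def pvSeg (l : List Char) : List Char := (l.reverse.takeWhile (· ≠ '\n')).reverse

-- Pre_ holds exactly when Python A returns (no IndexError): each written character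
-- (neither '\n' nor '\t') at position j is written to row 2 + (newlines before j) and
-- column 3 + (chars since the last newline, tabs counting 4), both of which must be
-- in range of the grid.
def Pre_dialog_window (talking_window : List (List String)) (text : String) : Prop :=
  ∀ j < text.toList.length,
    text.toList.getD j ' ' ≠ '\n' → text.toList.getD j ' ' ≠ '\t' →
    2 + (text.toList.take j).count '\n' < talking_window.length ∧
    3 + (pvSeg (text.toList.take j)).length + 3 * (pvSeg (text.toList.take j)).count '\t'
      < (talking_window.getD (2 + (text.toList.take j).count '\n') []).length
instance (talking_window : List (List String)) (text : String) : Decidable (Pre_dialog_window talking_window text) := by unfold Pre_dialog_window; infer_instance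

def pvWitness_dialog_window : List (List String) × String :=
  ([[], [], ["x", "x", "x", "x", "x"]], "hi")

def Spec_dialog_window (talking_window : List (List String)) (text : String) (out : List (List String)) : Prop := out = dialog_window_alt talking_window text
instance (talking_window : List (List String)) (text : String) (out : List (List String)) : Decidable (Spec_dialog_window talking_window text out) := by unfold Spec_dialog_window; infer_instance

-- ===== CLAIM (what is proved, stated in full; the proofs are below) =====
def Claim_equal_dialog_window : Prop := ∀ (talking_window : List (List String)) (text : String), Dom_dialog_window talking_window text → Pre_dialog_window talking_window text → Spec_dialog_window talking_window text (dialog_window talking_window text)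

-- ===== LEMMAS AND PROOFS =====

lemma pvSplitNL_ne_nil (cs : List Char) : pvSplitNL cs ≠ [] := by
  induction cs with
  | nil => simp [pvSplitNL]
  | cons c cs ih =>
    simp only [pvSplitNL]
    split
    · simp
    · cases h : pvSplitNL cs <;> simp

-- processing the remainder of the text from mid-line state (row, col)
def pvRun (g : List (List String)) (row col : Nat) : List (List Char) → List (List String)
  | [] => g
  | l :: ls => pvLines (l.foldl (pvStepB row) (g, col)).1 (row + 1) ls

lemma flat_eq_nested (cs : List Char) : ∀ (g : List (List String)) (row col : Nat),
    (cs.foldl pvStepA (g, row, col)).1 = pvRun g row col (pvSplitNL cs) := by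
  induction cs with
  | nil => intro g row col; simp [pvSplitNL, pvRun, pvLines]
  | cons c cs ih =>
    intro g row col
    by_cases hn : c = '\n'
    · subst hn
      simp only [List.foldl_cons, pvStepA, Char.reduceEq, reduceIte, pvSplitNL]
      rw [ih g (row + 1) 3]
      cases h : pvSplitNL cs with
      | nil => exact absurd h (pvSplitNL_ne_nil cs)
      | cons l ls => simp [pvRun, pvLines, List.foldl_nil]
    · by_cases ht : c = '\t'
      · subst ht
        simp only [List.foldl_cons, pvStepA, Char.reduceEq, reduceIte, pvSplitNL]
        rw [ih g row (col + 4)]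
        cases h : pvSplitNL cs with
        | nil => exact absurd h (pvSplitNL_ne_nil cs)
        | cons l ls => simp [pvRun, pvStepB, List.foldl_cons]
      · simp only [List.foldl_cons, pvStepA, if_neg hn, if_neg ht, pvSplitNL]
        rw [ih (pvSetCell g row col (String.ofList [c])) row (col + 1)]
        cases h : pvSplitNL cs with
        | nil => exact absurd h (pvSplitNL_ne_nil cs)
        | cons l ls => simp [pvRun, pvStepB, List.foldl_cons, if_neg ht]

-- ===== VERDICT (by name: the statement is the Claim_ definition above) =====
theorem dialog_window_spec : Claim_equal_dialog_window := by
  intro talking_window text _ _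
  unfold Spec_dialog_window dialog_window dialog_window_alt
  rw [flat_eq_nested]
  cases h : pvSplitNL text.toList with
  | nil => exact absurd h (pvSplitNL_ne_nil _)
  | cons l ls => simp [pvRun, pvLines]
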